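-- pv_equiv track=rewrite | github.com/anonymous-1-a/CountBot | backend/modules/external_agents/conversation.py | build_history_prompt
-- ===== SOURCE A (Python) =====
-- from typing import Mapping, Sequence
--
-- def sanitize_history_message_count(value: int | None) -> int:
--     """限制历史消息条数，避免 prompt 失控。"""
--     if value is None:
--         return 10
--     return max(1, min(50, int(value)))
--
-- def build_history_prompt(
--     task: str,
--     history_messages: Sequence[Mapping[str, str]] | None,
--     history_message_count: int,
-- ) -> str:
--     """把最近历史消息拼到当前任务里。"""
--     current_task = str(task or "").strip()
--     if not current_task:
--         return ""
--
--     messages = [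
--         {
--             "role": str(item.get("role") or "").strip().lower(),
--             "content": str(item.get("content") or "").strip(),
--         }
--         for item in (history_messages or [])
--     ]
--     messages = [
--         item
--         for item in messages
--         if item["role"] in {"user", "assistant", "system"} and item["content"]
--     ]
--
--     if not messages:
--         return current_task
--
--     trimmed = messages[-sanitize_history_message_count(history_message_count):]
--     lines = ["下面是最近对话历史，请结合上下文继续处理。", "", "最近历史："]
--     for item in trimmed:
--         role = {
--             "user": "用户",
--             "assistant": "助手",
--             "system": "系统",
--         }.get(item["role"], item["role"])
--         lines.append(f"[{role}] {item['content']}")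
--
--     lines.extend(["", "当前用户最新要求：", current_task])
--     return "\n".join(lines)
-- ===== SOURCE B (Python) =====
-- def build_history_prompt(task, history_messages, history_message_count):
--     current_task = str(task or "").strip()
--     if not current_task:
--         return ""
--
--     limit = max(1, min(50, int(history_message_count)))
--
--     # Walk the history backwards, collecting at most `limit` valid messages
--     # (newest first), stopping early instead of normalizing/filtering everything.
--     collected = []
--     for item in reversed(list(history_messages or [])):
--         role = str(item.get("role") or "").strip().lower()
--         content = str(item.get("content") or "").strip()
--         if role in ("user", "assistant", "system") and content:
--             collected.append((role, content))
--             if len(collected) == limit: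
--                 break
--
--     if not collected:
--         return current_task
--
--     role_names = {"user": "用户", "assistant": "助手", "system": "系统"}
--     lines = (
--         ["下面是最近对话历史，请结合上下文继续处理。", "", "最近历史："]
--         + [f"[{role_names[role]}] {content}" for role, content in reversed(collected)]
--         + ["", "当前用户最新要求：", current_task]
--     )
--     return "\n".join(lines)
-- ===== Notes on version B (the rewrite author's own statement) =====
-- stated objective: alternative
-- what changed: Instead of normalizing and filtering the whole history and then slicing the last N messages, B walks the history backwards, normalizes and filters on the fly, collects at most N valid messages and stops early, then reverses the buffer before formatting.
import Mathlib
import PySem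

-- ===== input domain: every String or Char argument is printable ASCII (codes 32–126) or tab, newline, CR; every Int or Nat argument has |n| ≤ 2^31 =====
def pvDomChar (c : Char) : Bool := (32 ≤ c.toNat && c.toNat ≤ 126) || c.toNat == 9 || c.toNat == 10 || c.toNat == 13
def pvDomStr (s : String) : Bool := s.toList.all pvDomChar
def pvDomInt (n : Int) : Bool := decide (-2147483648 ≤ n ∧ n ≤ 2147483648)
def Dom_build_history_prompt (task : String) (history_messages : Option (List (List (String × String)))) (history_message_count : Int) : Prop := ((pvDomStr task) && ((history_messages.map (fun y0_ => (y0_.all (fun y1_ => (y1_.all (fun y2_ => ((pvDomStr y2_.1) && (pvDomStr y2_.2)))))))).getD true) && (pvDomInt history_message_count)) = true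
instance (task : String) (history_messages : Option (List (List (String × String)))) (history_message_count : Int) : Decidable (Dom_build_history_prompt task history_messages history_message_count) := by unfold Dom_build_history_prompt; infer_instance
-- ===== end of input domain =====

-- B replaces A's "normalize+filter the whole history, then slice the last N" by a single
-- backward traversal that collects at most N valid messages and stops early (objective:
-- alternative traversal of the same cost class; the formatting/join tail is shared logic).

-- ===== PORT A =====
-- str(item.get(key) or ""): first-match dict lookup, None/"" both give ""
def pvLookup (item : List (String × String)) (key : String) : String :=
  ((PySem.Dict.mk item).get? key).getD ""

-- the dict-comprehension entry: normalized (role, content) of one history item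
def pvNorm (item : List (String × String)) : String × String :=
  (PySem.Str.lower (PySem.Str.strip (pvLookup item "role")),
   PySem.Str.strip (pvLookup item "content"))

-- the filter: role in {user, assistant, system} and content truthy
def pvValid (m : String × String) : Bool :=
  (m.1 == "user" || m.1 == "assistant" || m.1 == "system") && m.2 != ""

-- {"user": "用户", ...}.get(role, role)
def pvRoleLabel (r : String) : String :=
  ((PySem.Dict.mk [("user", "用户"), ("assistant", "助手"), ("system", "系统")]).get? r).getD r

def sanitize_history_message_count (value : Int) : Int :=
  max 1 (min 50 value)

def build_history_prompt (task : String) (history_messages : Option (List (List (String × String)))) (history_message_count : Int) : String :=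
  let current_task := PySem.Str.strip (if task == "" then "" else task)
  if current_task == "" then ""
  else
    let messages := (history_messages.getD []).map pvNorm
    let messages := messages.filter pvValid
    if messages.isEmpty then current_task
    else
      let trimmed := PySem.List.slice messages (some (-(sanitize_history_message_count history_message_count))) none
      let lines := ["下面是最近对话历史，请结合上下文继续处理。", "", "最近历史："]
      let lines := trimmed.foldl (fun acc m => acc ++ ["[" ++ pvRoleLabel m.1 ++ "] " ++ m.2]) lines
      let lines := lines ++ ["", "当前用户最新要求：", current_task]
      PySem.Str.join "\n" lines

-- ===== PORT B =====
-- the backward collecting loop of Source B: normalize each item, keep the valid ones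
-- (newest first), break as soon as `limit` are collected
def pvCollect (limit : Nat) : List (List (String × String)) → List (String × String)
  | [] => []
  | item :: rest =>
    let role := PySem.Str.lower (PySem.Str.strip (((PySem.Dict.mk item).get? "role").getD ""))
    let content := PySem.Str.strip (((PySem.Dict.mk item).get? "content").getD "")
    if (role == "user" || role == "assistant" || role == "system") && content != "" then
      if limit ≤ 1 then [(role, content)]          -- len(collected) == limit → break
      else (role, content) :: pvCollect (limit - 1) rest
    else pvCollect limit rest

def build_history_prompt_alt (task : String) (history_messages : Option (List (List (String × String)))) (history_message_count : Int) : String :=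
  let current_task := PySem.Str.strip (if task == "" then "" else task)
  if current_task == "" then ""
  else
    let limit := (max 1 (min 50 history_message_count)).toNat
    let collected := pvCollect limit (history_messages.getD []).reverse
    if collected.isEmpty then current_task
    else
      -- role_names[role] never raises here (role was filtered into the three keys),
      -- so the total lookup pvRoleLabel is exact for Source B's role_names[role]
      let lines :=
        ["下面是最近对话历史，请结合上下文继续处理。", "", "最近历史："]
        ++ collected.reverse.map (fun m => "[" ++ pvRoleLabel m.1 ++ "] " ++ m.2)
        ++ ["", "当前用户最新要求：", current_task]
      PySem.Str.join "\n" lines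

-- ===== PRECONDITION & SPEC =====
def Spec_build_history_prompt (task : String) (history_messages : Option (List (List (String × String)))) (history_message_count : Int) (out : String) : Prop := out = build_history_prompt_alt task history_messages history_message_count
instance (task : String) (history_messages : Option (List (List (String × String)))) (history_message_count : Int) (out : String) : Decidable (Spec_build_history_prompt task history_messages history_message_count out) := by unfold Spec_build_history_prompt; infer_instance

-- ===== CLAIM (what is proved, stated in full; the proofs are below) =====
def Claim_equal_build_history_prompt : Prop := ∀ (task : String) (history_messages : Option (List (List (String × String)))) (history_message_count : Int), Dom_build_history_prompt task history_messages history_message_count → Spec_build_history_prompt task history_messages history_message_count (build_history_prompt task history_messages history_message_count)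

-- ===== LEMMAS AND PROOFS =====

-- pvCollect's cons step, phrased through A's pvNorm/pvValid (the same expressions)
theorem pvCollect_cons (limit : Nat) (item : List (String × String)) (rest : List (List (String × String))) :
    pvCollect limit (item :: rest) =
      if pvValid (pvNorm item) then
        (if limit ≤ 1 then [pvNorm item] else pvNorm item :: pvCollect (limit - 1) rest)
      else pvCollect limit rest := by
  simp only [pvCollect, pvValid, pvNorm, pvLookup]

-- B's loop = "take limit of the normalized-and-filtered stream", for limit ≥ 1
theorem pvCollect_eq_take (l : List (List (String × String))) :
    ∀ limit : Nat, 1 ≤ limit →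
      pvCollect limit l = ((l.map pvNorm).filter pvValid).take limit := by
  induction l with
  | nil => intro limit _; simp [pvCollect]
  | cons item rest ih =>
    intro limit hl
    rw [pvCollect_cons]
    simp only [List.map_cons, List.filter_cons]
    by_cases hv : pvValid (pvNorm item) = true
    · rw [if_pos hv, if_pos hv]
      by_cases h1 : limit ≤ 1
      · have : limit = 1 := by omega
        subst this
        simp
      · rw [if_neg h1, ih (limit - 1) (by omega)]
        obtain ⟨n, rfl⟩ : ∃ n, limit = n + 1 := ⟨limit - 1, by omega⟩
        simp
    · rw [if_neg hv, if_neg hv]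
      exact ih limit hl

theorem take_eq_nil_iff_of_pos {α : Type} (l : List α) (k : Nat) (hk : 1 ≤ k) :
    l.take k = [] ↔ l = [] := by
  cases l <;> simp; omega

theorem strip_or_empty (task : String) :
    PySem.Str.strip (if task == "" then "" else task) = PySem.Str.strip task := by
  by_cases h : task == ""
  · have : task = "" := by simpa using h
    subst this; simp
  · simp [h]

theorem build_history_prompt_spec : Claim_equal_build_history_prompt := by
  unfold Claim_equal_build_history_prompt Spec_build_history_prompt
  intro task hm hmc _
  unfold build_history_prompt build_history_prompt_alt
  simp only [strip_or_empty]
  by_cases ht : PySem.Str.strip task == ""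
  · rw [if_pos ht, if_pos ht]
  · rw [if_neg ht, if_neg ht]
    set l := hm.getD [] with hl
    set msgs := (l.map pvNorm).filter pvValid with hmsgs
    have hk1 : (1 : Int) ≤ max 1 (min 50 hmc) := le_max_left _ _
    set s : Int := max 1 (min 50 hmc) with hs
    have hsnat : s = ((s.toNat : Nat) : Int) := by omega
    have hknat : 1 ≤ s.toNat := by omega
    have hcol : pvCollect s.toNat l.reverse = msgs.reverse.take s.toNat := by
      rw [pvCollect_eq_take _ _ hknat, List.map_reverse, List.filter_reverse, hmsgs]
    have htrim : PySem.List.slice msgs (some (-(sanitize_history_message_count hmc))) none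
        = (pvCollect s.toNat l.reverse).reverse := by
      rw [hcol, List.take_reverse, List.reverse_reverse]
      unfold sanitize_history_message_count
      rw [← hs, hsnat, PySem.List.slice_from_neg_natCast _ _ hknat]
      rw [Int.toNat_natCast]
    by_cases he : msgs = []
    · have hcn : pvCollect s.toNat l.reverse = [] := by rw [hcol, he]; simp
      rw [he, hcn]
      simp
    · have hA : ¬ (msgs.isEmpty = true) := by simpa [List.isEmpty_iff] using he
      have hB : ¬ ((pvCollect s.toNat l.reverse).isEmpty = true) := by
        rw [List.isEmpty_iff, hcol]
        intro h
        exact he (by simpa using (take_eq_nil_iff_of_pos msgs.reverse s.toNat hknat).mp h)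
      rw [if_neg hA, if_neg hB, htrim]
      congr 1
      rw [PySem.List.foldl_append_singleton_eq_map, List.append_assoc]
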